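-- pv_equiv track=rewrite | github.com/thu-yao-01-luo/Diffusion-Policies-for-Offline-RL | test/count_halfcheetah.py | compute_interval_lengths
-- ===== SOURCE A (Python) =====
-- def compute_interval_lengths(arr):
--     interval_lengths = []
--     start = 0
--
--     for i in range(len(arr)):
--         if arr[i]:
--             interval_lengths.append(i - start + 1)
--             start = i
--     interval_lengths.append(len(arr) - start + 1)
--     return interval_lengths
-- ===== SOURCE B (Python) =====
-- def compute_interval_lengths(arr):
--     positions = [i for i, x in enumerate(arr) if x]
--     b = [0] + positions + [len(arr)]
--     return [y - x + 1 for x, y in zip(b, b[1:])]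
-- ===== Notes on version B (the rewrite author's own statement) =====
-- stated objective: simpler
-- what changed: Replaces the stateful single pass carrying a running 'start' index with a declarative pipeline: collect the truthy positions, pad them with boundaries 0 and len(arr), and take pairwise differences (+1) over adjacent boundary pairs.
import Mathlib
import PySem

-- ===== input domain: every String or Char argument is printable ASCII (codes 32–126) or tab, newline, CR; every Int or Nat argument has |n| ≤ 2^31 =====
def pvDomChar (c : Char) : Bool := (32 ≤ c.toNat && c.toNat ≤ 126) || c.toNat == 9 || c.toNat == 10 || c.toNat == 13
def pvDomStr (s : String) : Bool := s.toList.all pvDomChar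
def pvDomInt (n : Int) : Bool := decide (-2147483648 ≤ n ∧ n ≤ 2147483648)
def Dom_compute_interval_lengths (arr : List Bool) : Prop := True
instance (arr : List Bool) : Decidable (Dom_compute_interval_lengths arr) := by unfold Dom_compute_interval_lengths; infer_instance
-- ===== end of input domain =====

-- B replaces A's stateful pass (running 'start') by truthy positions + boundary padding + pairwise differences; objective: simpler.

-- ===== PORT A =====
def compute_interval_lengths (arr : List Bool) : List Int :=
  let n : Int := arr.length
  let st := (PySem.List.pyRange 0 n 1).foldl
    (fun (st : List Int × Int) i =>
      if PySem.List.pyGetD arr i false then (st.1 ++ [i - st.2 + 1], i) else st)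
    (([] : List Int), (0 : Int))
  st.1 ++ [n - st.2 + 1]

-- ===== PORT B =====
def compute_interval_lengths_alt (arr : List Bool) : List Int :=
  let positions : List Int := ((PySem.List.enumerate arr 0).filter (fun p => p.2)).map (fun p => p.1)
  let b : List Int := 0 :: positions ++ [(arr.length : Int)]
  List.zipWith (fun x y => y - x + 1) b (b.drop 1)

-- ===== PRECONDITION & SPEC =====
def Spec_compute_interval_lengths (arr : List Bool) (out : List Int) : Prop := out = compute_interval_lengths_alt arr
instance (arr : List Bool) (out : List Int) : Decidable (Spec_compute_interval_lengths arr out) := by unfold Spec_compute_interval_lengths; infer_instance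

-- ===== CLAIM (what is proved, stated in full; the proofs are below) =====
def Claim_equal_compute_interval_lengths : Prop := ∀ (arr : List Bool), Dom_compute_interval_lengths arr → Spec_compute_interval_lengths arr (compute_interval_lengths arr)

-- ===== LEMMAS AND PROOFS =====

/-- Interval lengths from a start boundary, a list of cut positions, and an end boundary. -/
def pvG (start : Int) : List Int → Int → List Int
  | [], n => [n - start + 1]
  | p :: ps, n => (p - start + 1) :: pvG p ps n

theorem pvZip_eq_pvG (ps : List Int) (start n : Int) :
    List.zipWith (fun x y => y - x + 1) (start :: ps ++ [n]) ((start :: ps ++ [n]).drop 1)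
      = pvG start ps n := by
  induction ps generalizing start with
  | nil => simp [pvG]
  | cons p ps ih => simpa [pvG] using ih p

theorem pvFoldA (arr : List Bool) : ∀ (s start : Int) (acc : List Int),
    (let r := (PySem.List.enumerate arr s).foldl
        (fun (st : List Int × Int) p => if p.2 then (st.1 ++ [p.1 - st.2 + 1], p.1) else st)
        (acc, start)
     r.1 ++ [(s + arr.length) - r.2 + 1])
    = acc ++ pvG start (((PySem.List.enumerate arr s).filter (fun p => p.2)).map (fun p => p.1))
        (s + arr.length) := by
  induction arr with
  | nil => intro s start acc; simp [PySem.List.enumerate_nil, pvG]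
  | cons x xs ih =>
    intro s start acc
    cases x with
    | false =>
      have h := ih (s + 1) start acc
      simpa [PySem.List.enumerate_cons, add_assoc, add_comm, add_left_comm] using h
    | true =>
      have h := ih (s + 1) s (acc ++ [s - start + 1])
      simp only [PySem.List.enumerate_cons, List.foldl_cons, List.filter_cons,
        List.length_cons, if_true, List.map_cons] at *
      simp only [show ((s : Int) + ((xs.length : Nat) + 1 : Nat)) = (s + 1) + (xs.length : Int) by push_cast; ring]
      rw [h]
      simp [pvG, List.append_assoc]

-- ===== VERDICT (by name: the statement is the Claim_ definition above) =====
theorem compute_interval_lengths_spec : Claim_equal_compute_interval_lengths := by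
  intro arr _
  unfold Spec_compute_interval_lengths compute_interval_lengths compute_interval_lengths_alt
  simp only []
  rw [pvZip_eq_pvG]
  have he := PySem.List.enumerate_eq_map_pyRange (xs := arr) (d := false)
  have hfold :
      (PySem.List.pyRange 0 (arr.length : Int) 1).foldl
        (fun (st : List Int × Int) i =>
          if PySem.List.pyGetD arr i false then (st.1 ++ [i - st.2 + 1], i) else st)
        (([] : List Int), (0 : Int))
      = (PySem.List.enumerate arr 0).foldl
        (fun (st : List Int × Int) p => if p.2 then (st.1 ++ [p.1 - st.2 + 1], p.1) else st)
        (([] : List Int), (0 : Int)) := by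
    rw [he, List.foldl_map]; rfl
  rw [hfold]
  have h := pvFoldA arr 0 0 []
  simpa using h
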